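-- pv_equiv track=rewrite | github.com/alijkhalil/dl_utilities | datasets/dataset_utils.py | convert_word_dataset_to_char_dataset
-- ===== SOURCE A (Python) =====
-- special_chars = [ '^', '$', ' ', '\'' ]
--
-- alpha_chars = [ chr(ord('a') + i) for i in range(26) ]
--
-- digit_chars = [ chr(ord('0') + i) for i in range(10) ]
--
-- def convert_word_list_to_str(word_list, sorted_keys, start_index=4):
--     out_string=""
--
--     # Iterate through word ID's
--     for i, num in enumerate(word_list):
--         if num == 1:
--             out_string += '^'
--         elif num == 2:
--             out_string += '*'
--         else:
--             out_string += sorted_keys[num-start_index][0]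
--             if i + 1 != len(word_list):
--                 out_string += ' '
--
--     # Add end token
--     out_string += '$'
--
--
--     # Return it
--     return out_string
--
-- def convert_str_to_char_list(input_str):
--     min_char_ord = ord('a')
--     min_digit_ord = ord('0')
--
--     special_start = 1
--     alpha_start = len(special_chars) + special_start
--     digit_start = len(alpha_chars) + alpha_start
--
--     def find_index(item, list):
--         for i, tmp_item in enumerate(list):
--             if item == tmp_item:
--                 return i
--
--         return 0
--
--     # Transform string into list of chars (omitting unusual chars)
--     char_list = []
--     for char in input_str:
--         if char in special_chars:
--             char_list.append(find_index(char, special_chars) + special_start)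
--
--         elif char >= 'a' and char <= 'z':
--             char_list.append(ord(char) - min_char_ord + alpha_start)
--
--         elif char in digit_chars:
--             char_list.append(ord(char) - min_digit_ord + digit_start)
--
--
--     # Return char review list
--     return char_list
--
-- def convert_word_dataset_to_char_dataset(X_dataset, sorted_keys):
--     # Convert to strings
--     str_reviews = []
--     for i in range(len(X_dataset)):
--         str_reviews.append(convert_word_list_to_str(X_dataset[i], sorted_keys))
--
--     # Iterate through each review and convert to char-based lists
--     char_reviews = []
--     for str_review in str_reviews:
--         char_reviews.append(convert_str_to_char_list(str_review))
--
--
--     # Return text in char sequence format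
--     return char_reviews
-- ===== SOURCE B (Python) =====
-- def _char_index(c):
--     if c == '^': return 1
--     if c == '$': return 2
--     if c == ' ': return 3
--     if c == "'": return 4
--     if 'a' <= c <= 'z': return ord(c) - ord('a') + 5
--     if '0' <= c <= '9': return ord(c) - ord('0') + 31
--     return None
--
-- def convert_word_dataset_to_char_dataset(X_dataset, sorted_keys):
--     result = []
--     for word_list in X_dataset:
--         n = len(word_list)
--         out = []
--         for i, num in enumerate(word_list):
--             if num == 1:
--                 out.append(1)            # '^'
--             elif num == 2:
--                 pass                     # '*' never maps to an index
--             else: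
--                 for c in sorted_keys[num - 4][0]:
--                     idx = _char_index(c)
--                     if idx is not None:
--                         out.append(idx)
--                 if i + 1 != n:
--                     out.append(3)        # ' '
--         out.append(2)                    # '$'
--         result.append(out)
--     return result
-- ===== Notes on version B (the rewrite author's own statement) =====
-- stated objective: alternative
-- what changed: B emits each review's char indices in a single pass over the word IDs (direct per-char index table), instead of A's two phases of building an intermediate string and then re-scanning it with a linear find_index over the special-char list.
import Mathlib
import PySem

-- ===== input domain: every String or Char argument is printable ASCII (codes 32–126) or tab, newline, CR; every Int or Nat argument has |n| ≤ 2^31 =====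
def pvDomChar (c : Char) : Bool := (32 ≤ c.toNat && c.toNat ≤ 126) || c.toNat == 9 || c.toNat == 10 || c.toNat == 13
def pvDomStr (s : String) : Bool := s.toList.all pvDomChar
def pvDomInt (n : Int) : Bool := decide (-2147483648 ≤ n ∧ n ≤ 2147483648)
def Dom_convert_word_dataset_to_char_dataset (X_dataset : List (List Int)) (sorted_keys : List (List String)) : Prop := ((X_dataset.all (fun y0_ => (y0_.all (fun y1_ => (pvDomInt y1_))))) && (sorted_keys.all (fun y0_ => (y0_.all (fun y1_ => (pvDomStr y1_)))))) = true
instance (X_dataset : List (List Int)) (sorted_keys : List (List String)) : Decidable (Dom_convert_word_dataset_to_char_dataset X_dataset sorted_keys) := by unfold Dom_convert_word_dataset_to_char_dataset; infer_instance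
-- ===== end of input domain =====

-- B builds each char-index list in one pass per review (no intermediate string, no linear
-- find_index scan); objective: simpler/alternative decomposition, same return value.

-- ===== PORT A =====
def pvA_special : List Char := ['^', '$', ' ', '\'']

def pvA_alpha : List Char := (PySem.List.pyRange 0 26 1).map (fun i => Char.ofNat ('a'.toNat + i.toNat))

def pvA_digits : List Char := (PySem.List.pyRange 0 10 1).map (fun i => Char.ofNat ('0'.toNat + i.toNat))

-- for i, tmp_item in enumerate(list): if item == tmp_item: return i; return 0
def pvA_findIndex (item : Char) (l : List Char) : Int :=
  ((PySem.List.enumerate l 0).find? (fun p => item == p.2)).elim 0 (·.1)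

-- convert_word_list_to_str (out_string built char-list-wise; '+= s' is ++ s.toList)
def pvA_wordToStr (word_list : List Int) (sorted_keys : List (List String)) (start_index : Int) : List Char :=
  ((PySem.List.enumerate word_list 0).foldl (fun out_string p =>
      if p.2 = 1 then out_string ++ ['^']
      else if p.2 = 2 then out_string ++ ['*']
      else
        let out_string := out_string ++
          (PySem.List.pyGetD (PySem.List.pyGetD sorted_keys (p.2 - start_index) []) 0 "").toList
        if p.1 + 1 ≠ (word_list.length : Int) then out_string ++ [' '] else out_string)
    []) ++ ['$']

-- the local constants of convert_str_to_char_list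
def pvA_specialStart : Int := 1
def pvA_alphaStart : Int := (pvA_special.length : Int) + pvA_specialStart
def pvA_digitStart : Int := (pvA_alpha.length : Int) + pvA_alphaStart

-- loop body of convert_str_to_char_list
def pvA_classifyStep (char_list : List Int) (ch : Char) : List Int :=
  if ch ∈ pvA_special then char_list ++ [pvA_findIndex ch pvA_special + pvA_specialStart]
  else if 'a' ≤ ch ∧ ch ≤ 'z' then char_list ++ [((ch.toNat : Int) - ('a'.toNat : Int)) + pvA_alphaStart]
  else if ch ∈ pvA_digits then char_list ++ [((ch.toNat : Int) - ('0'.toNat : Int)) + pvA_digitStart]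
  else char_list

def pvA_strToChars (input_str : List Char) : List Int :=
  input_str.foldl pvA_classifyStep []

def convert_word_dataset_to_char_dataset (X_dataset : List (List Int)) (sorted_keys : List (List String)) : List (List Int) :=
  let str_reviews :=
    (PySem.List.pyRange 0 (X_dataset.length : Int) 1).map
      (fun i => pvA_wordToStr (PySem.List.pyGetD X_dataset i []) sorted_keys 4)
  str_reviews.map pvA_strToChars

-- ===== PORT B =====
def pvB_charIndex (ch : Char) : Option Int :=
  if ch = '^' then some 1
  else if ch = '$' then some 2
  else if ch = ' ' then some 3
  else if ch = '\'' then some 4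
  else if 'a' ≤ ch ∧ ch ≤ 'z' then some (((ch.toNat : Int) - ('a'.toNat : Int)) + 5)
  else if '0' ≤ ch ∧ ch ≤ '9' then some (((ch.toNat : Int) - ('0'.toNat : Int)) + 31)
  else none

def pvB_row (sorted_keys : List (List String)) (word_list : List Int) : List Int :=
  ((PySem.List.enumerate word_list 0).foldl (fun out p =>
      if p.2 = 1 then out ++ [(1 : Int)]
      else if p.2 = 2 then out
      else
        let out := out ++
          ((PySem.List.pyGetD (PySem.List.pyGetD sorted_keys (p.2 - 4) []) 0 "").toList).filterMap pvB_charIndex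
        if p.1 + 1 ≠ (word_list.length : Int) then out ++ [(3 : Int)] else out)
    []) ++ [(2 : Int)]

def convert_word_dataset_to_char_dataset_alt (X_dataset : List (List Int)) (sorted_keys : List (List String)) : List (List Int) :=
  X_dataset.map (pvB_row sorted_keys)

-- ===== PRECONDITION & SPEC =====
-- Pre_ excludes exactly the inputs on which the Python A raises (IndexError): a word id other
-- than 1 or 2 whose sorted_keys entry is out of range or an empty key list.
def Pre_convert_word_dataset_to_char_dataset (X_dataset : List (List Int)) (sorted_keys : List (List String)) : Prop :=
  ∀ row ∈ X_dataset, ∀ num ∈ row,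
    num = 1 ∨ num = 2 ∨ (PySem.List.pyGetD sorted_keys (num - 4) []) ≠ []
instance (X_dataset : List (List Int)) (sorted_keys : List (List String)) : Decidable (Pre_convert_word_dataset_to_char_dataset X_dataset sorted_keys) := by unfold Pre_convert_word_dataset_to_char_dataset; infer_instance

def pvWitness_convert_word_dataset_to_char_dataset : List (List Int) × List (List String) :=
  ([[1, 4, 2, 5], [5]], [["ab0"], ["c*'", "d"]])

def Spec_convert_word_dataset_to_char_dataset (X_dataset : List (List Int)) (sorted_keys : List (List String)) (out : List (List Int)) : Prop := out = convert_word_dataset_to_char_dataset_alt X_dataset sorted_keys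
instance (X_dataset : List (List Int)) (sorted_keys : List (List String)) (out : List (List Int)) : Decidable (Spec_convert_word_dataset_to_char_dataset X_dataset sorted_keys out) := by unfold Spec_convert_word_dataset_to_char_dataset; infer_instance

-- ===== CLAIM (what is proved, stated in full; the proofs are below) =====
def Claim_equal_convert_word_dataset_to_char_dataset : Prop := ∀ (X_dataset : List (List Int)) (sorted_keys : List (List String)), Dom_convert_word_dataset_to_char_dataset X_dataset sorted_keys → Pre_convert_word_dataset_to_char_dataset X_dataset sorted_keys → Spec_convert_word_dataset_to_char_dataset X_dataset sorted_keys (convert_word_dataset_to_char_dataset X_dataset sorted_keys)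

-- ===== LEMMAS AND PROOFS =====
theorem pv_char_eq_of_toNat {c d : Char} (h : c.toNat = d.toNat) : c = d :=
  Char.ext (UInt32.toNat_inj.mp h)

theorem pv_mem_digits (ch : Char) : ch ∈ pvA_digits ↔ ('0' ≤ ch ∧ ch ≤ '9') := by
  have hd : pvA_digits = ['0','1','2','3','4','5','6','7','8','9'] := by decide
  rw [hd]
  constructor
  · intro h
    fin_cases h <;> exact ⟨by decide, by decide⟩
  · rintro ⟨h1, h2⟩
    have hlo : 48 ≤ ch.toNat := h1
    have hhi : ch.toNat ≤ 57 := h2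
    have : ch.toNat = 48 ∨ ch.toNat = 49 ∨ ch.toNat = 50 ∨ ch.toNat = 51 ∨ ch.toNat = 52 ∨
        ch.toNat = 53 ∨ ch.toNat = 54 ∨ ch.toNat = 55 ∨ ch.toNat = 56 ∨ ch.toNat = 57 := by omega
    rcases this with h | h | h | h | h | h | h | h | h | h
    · simp [pv_char_eq_of_toNat (d := '0') (h.trans (by decide))]
    · simp [pv_char_eq_of_toNat (d := '1') (h.trans (by decide))]
    · simp [pv_char_eq_of_toNat (d := '2') (h.trans (by decide))]
    · simp [pv_char_eq_of_toNat (d := '3') (h.trans (by decide))]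
    · simp [pv_char_eq_of_toNat (d := '4') (h.trans (by decide))]
    · simp [pv_char_eq_of_toNat (d := '5') (h.trans (by decide))]
    · simp [pv_char_eq_of_toNat (d := '6') (h.trans (by decide))]
    · simp [pv_char_eq_of_toNat (d := '7') (h.trans (by decide))]
    · simp [pv_char_eq_of_toNat (d := '8') (h.trans (by decide))]
    · simp [pv_char_eq_of_toNat (d := '9') (h.trans (by decide))]

-- A's per-char classification agrees with B's char-index table
theorem pv_classify_eq (acc : List Int) (ch : Char) :
    pvA_classifyStep acc ch = acc ++ (pvB_charIndex ch).toList := by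
  by_cases h1 : ch = '^'
  · subst h1; rfl
  by_cases h2 : ch = '$'
  · subst h2; rfl
  by_cases h3 : ch = ' '
  · subst h3; rfl
  by_cases h4 : ch = '\''
  · subst h4; rfl
  have hmem : ch ∉ pvA_special := by simp [pvA_special, h1, h2, h3, h4]
  by_cases ha : 'a' ≤ ch ∧ ch ≤ 'z'
  · simp [pvA_classifyStep, pvB_charIndex, ha, h1, h2, h3, h4, pvA_alphaStart,
      pvA_special, pvA_specialStart]
  by_cases hdig : '0' ≤ ch ∧ ch ≤ '9'
  · have hm : ch ∈ pvA_digits := (pv_mem_digits ch).mpr hdig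
    simp [pvA_classifyStep, pvB_charIndex, ha, hdig, h1, h2, h3, h4, hm, pvA_digitStart,
      pvA_alphaStart, pvA_special, pvA_specialStart, pvA_alpha]
  · have hm : ch ∉ pvA_digits := fun h => hdig ((pv_mem_digits ch).mp h)
    simp [pvA_classifyStep, pvB_charIndex, hmem, ha, hdig, h1, h2, h3, h4, hm]

theorem pv_strToChars_go (s : List Char) : ∀ acc : List Int,
    s.foldl pvA_classifyStep acc = acc ++ s.filterMap pvB_charIndex := by
  induction s with
  | nil => simp
  | cons c t ih =>
    intro acc
    rw [List.foldl_cons, pv_classify_eq, ih]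
    cases hB : pvB_charIndex c <;> simp [hB]

theorem pv_strToChars_eq (s : List Char) :
    pvA_strToChars s = s.filterMap pvB_charIndex := by
  simpa [pvA_strToChars] using pv_strToChars_go s []

-- the two per-token loop bodies are related by filterMap of B's char table
theorem pv_fold_rel (sk : List (List String)) (n : Int) :
    ∀ (l : List (Int × Int)) (accA : List Char),
    List.filterMap pvB_charIndex (l.foldl (fun out_string p =>
        if p.2 = 1 then out_string ++ ['^']
        else if p.2 = 2 then out_string ++ ['*']
        else
          let out_string := out_string ++
            (PySem.List.pyGetD (PySem.List.pyGetD sk (p.2 - 4) []) 0 "").toList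
          if p.1 + 1 ≠ n then out_string ++ [' '] else out_string) accA)
      = l.foldl (fun out p =>
        if p.2 = 1 then out ++ [(1 : Int)]
        else if p.2 = 2 then out
        else
          let out := out ++
            ((PySem.List.pyGetD (PySem.List.pyGetD sk (p.2 - 4) []) 0 "").toList).filterMap pvB_charIndex
          if p.1 + 1 ≠ n then out ++ [(3 : Int)] else out) (accA.filterMap pvB_charIndex) := by
  intro l
  induction l with
  | nil => intro accA; simp
  | cons p t ih =>
    intro accA
    simp only [List.foldl_cons]
    rw [ih]
    congr 1
    by_cases h1 : p.2 = 1
    · simp [h1, List.filterMap_append, pvB_charIndex]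
    by_cases h2 : p.2 = 2
    · simp [h2, List.filterMap_append, pvB_charIndex]
    · simp only [h1, h2, if_false]
      split_ifs <;>
        simp [List.filterMap_append, pvB_charIndex]

-- per review: string pass then char pass = B's single pass
theorem pv_row_eq (sorted_keys : List (List String)) (word_list : List Int) :
    pvA_strToChars (pvA_wordToStr word_list sorted_keys 4) = pvB_row sorted_keys word_list := by
  unfold pvA_wordToStr pvB_row
  rw [pv_strToChars_eq, List.filterMap_append]
  have hdollar : List.filterMap pvB_charIndex ['$'] = [(2 : Int)] := by decide
  rw [hdollar]
  congr 1
  exact pv_fold_rel sorted_keys (word_list.length : Int) (PySem.List.enumerate word_list 0) []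

theorem pv_main_eq (X_dataset : List (List Int)) (sorted_keys : List (List String)) :
    convert_word_dataset_to_char_dataset X_dataset sorted_keys =
      convert_word_dataset_to_char_dataset_alt X_dataset sorted_keys := by
  unfold convert_word_dataset_to_char_dataset convert_word_dataset_to_char_dataset_alt
  rw [List.map_map]
  have h := congrArg (List.map (fun row => pvA_strToChars (pvA_wordToStr row sorted_keys 4)))
    (PySem.List.map_pyGetD_pyRange_zero' X_dataset ([] : List Int))
  rw [List.map_map] at h
  calc (PySem.List.pyRange 0 (X_dataset.length : Int) 1).map
        ((fun s => pvA_strToChars s) ∘ fun i => pvA_wordToStr (PySem.List.pyGetD X_dataset i []) sorted_keys 4)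
      = X_dataset.map (fun row => pvA_strToChars (pvA_wordToStr row sorted_keys 4)) := h
    _ = X_dataset.map (pvB_row sorted_keys) := List.map_congr_left (fun row _ => pv_row_eq sorted_keys row)

-- ===== VERDICT (by name: the statement is the Claim_ definition above) =====
theorem convert_word_dataset_to_char_dataset_spec : Claim_equal_convert_word_dataset_to_char_dataset := by
  intro X sk _ _
  unfold Spec_convert_word_dataset_to_char_dataset
  exact pv_main_eq X sk
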